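-- pv_equiv track=rewrite | github.com/Ashish-Negi8750/hash-cracker | hash_cracker_cli.py | parse_mask
-- ===== SOURCE A (Python) =====
-- import itertools
--
-- def parse_mask(mask):
--     mask_map = {
--         "?l": "abcdefghijklmnopqrstuvwxyz",
--         "?u": "ABCDEFGHIJKLMNOPQRSTUVWXYZ",
--         "?d": "0123456789",
--         "?s": "!@#$%^&*"
--     }
--     charset_list = []
--     i = 0
--     while i < len(mask):
--         if mask[i:i+2] in mask_map:
--             charset_list.append(mask_map[mask[i:i+2]])
--             i += 2
--         else:
--             charset_list.append(mask[i])
--             i += 1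
--     return (''.join(candidate) for candidate in itertools.product(*charset_list))
-- ===== SOURCE B (Python) =====
-- def parse_mask(mask):
--     mask_map = {
--         "?l": "abcdefghijklmnopqrstuvwxyz",
--         "?u": "ABCDEFGHIJKLMNOPQRSTUVWXYZ",
--         "?d": "0123456789",
--         "?s": "!@#$%^&*"
--     }
--
--     def charsets(s):
--         out = []
--         while s:
--             if s[:2] in mask_map:
--                 out.append(mask_map[s[:2]])
--                 s = s[2:]
--             else:
--                 out.append(s[0])
--                 s = s[1:]
--         return out
--
--     def product(cs):
--         # lazy mixed-radix enumeration: the k-th candidate is k written in the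
--         # mixed radix of the charset sizes (last charset = least significant digit)
--         total = 1
--         for c in cs:
--             total *= len(c)
--         for k in range(total):
--             rem = k
--             word = []
--             for c in reversed(cs):
--                 rem, r = divmod(rem, len(c))
--                 word.append(c[r])
--             yield ''.join(reversed(word))
--
--     return product(charsets(mask))
-- ===== Notes on version B (the rewrite author's own statement) =====
-- stated objective: alternative
-- what changed: itertools.product is replaced by a hand-written lazy mixed-radix enumerator (the k-th candidate is k written in the mixed radix of the charset sizes via a reversed divmod loop, preserving product's odometer order), and the mask is parsed by slicing the string down (s = s[2:]/s[1:]) instead of index arithmetic.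
import Mathlib
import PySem

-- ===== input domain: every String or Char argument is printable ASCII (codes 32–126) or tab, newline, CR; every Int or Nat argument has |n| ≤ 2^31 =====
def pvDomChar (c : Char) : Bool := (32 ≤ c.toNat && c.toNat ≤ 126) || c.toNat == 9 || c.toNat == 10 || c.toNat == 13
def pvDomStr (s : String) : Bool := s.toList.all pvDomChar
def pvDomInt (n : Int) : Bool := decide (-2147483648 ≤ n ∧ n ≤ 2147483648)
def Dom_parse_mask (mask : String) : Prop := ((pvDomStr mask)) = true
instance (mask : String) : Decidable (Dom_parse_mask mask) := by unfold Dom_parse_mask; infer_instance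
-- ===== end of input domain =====

-- B replaces itertools.product with a hand-written lazy recursive Cartesian product and parses
-- the mask by slicing it down instead of index arithmetic (objective: alternative decomposition).
-- A returns a lazy generator in Python; both ports materialise it as the list of all candidates
-- in generator order, so the equivalence is about the produced sequence of strings.

-- ===== PORT A =====
-- the four charsets of mask_map (shared literal constants)
def pmLower : List Char := "abcdefghijklmnopqrstuvwxyz".toList
def pmUpper : List Char := "ABCDEFGHIJKLMNOPQRSTUVWXYZ".toList
def pmDigit : List Char := "0123456789".toList
def pmSym   : List Char := "!@#$%^&*".toList

-- the `while i < len(mask)` loop building charset_list; mask[i:i+2] = (cs.drop i).take 2,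
-- `in mask_map` = the chain of comparisons with the four keys, mask[i] = (cs.drop i).take 1
def pmLoop (cs : List Char) (i : Nat) : List (List Char) :=
  if i < cs.length then
    let two := (cs.drop i).take 2
    if two = ['?', 'l'] then pmLower :: pmLoop cs (i + 2)
    else if two = ['?', 'u'] then pmUpper :: pmLoop cs (i + 2)
    else if two = ['?', 'd'] then pmDigit :: pmLoop cs (i + 2)
    else if two = ['?', 's'] then pmSym :: pmLoop cs (i + 2)
    else ((cs.drop i).take 1) :: pmLoop cs (i + 1)
  else []
termination_by cs.length - i

-- itertools.product(*charset_list) (odometer: a tuple list grown left-to-right by a fold,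
-- each existing tuple extended by every char of the next charset), then ''.join of each tuple
def parse_mask (mask : String) : List String :=
  ((pmLoop mask.toList 0).foldl
      (fun acc cset => acc.flatMap (fun t => cset.map (fun c => t ++ [c]))) [[]]).map
    (fun t => String.ofList t)

-- ===== PORT B =====
-- charsets(s): the while loop consuming s by slices (s = s[2:] / s[1:]) = recursion on the shrinking list
def pmCharsets (s : List Char) : List (List Char) :=
  match s with
  | [] => []
  | c :: r =>
    let two := (c :: r).take 2
    if two = ['?', 'l'] then pmLower :: pmCharsets r.tail
    else if two = ['?', 'u'] then pmUpper :: pmCharsets r.tail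
    else if two = ['?', 'd'] then pmDigit :: pmCharsets r.tail
    else if two = ['?', 's'] then pmSym :: pmCharsets r.tail
    else [c] :: pmCharsets r
termination_by s.length
decreasing_by all_goals simp [List.length_tail]

-- product(cs): lazy mixed-radix enumeration; total = the fold multiplying the sizes,
-- the k-th word = the reversed-divmod loop over reversed(cs) (index r is always in range,
-- so getD's default is unreachable); materialised here as the map over range(total)
def pmTotal (cs : List (List Char)) : Nat := cs.foldl (fun a c => a * c.length) 1

def pmDecode (cs : List (List Char)) (k : Nat) : List Char :=
  (cs.reverse.foldl
    (fun (p : Nat × List Char) c => (p.1 / c.length, p.2 ++ [c.getD (p.1 % c.length) ' ']))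
    (k, [])).2.reverse

def parse_mask_alt (mask : String) : List String :=
  (List.range (pmTotal (pmCharsets mask.toList))).map
    (fun k => String.ofList (pmDecode (pmCharsets mask.toList) k))

-- ===== PRECONDITION & SPEC =====
def Spec_parse_mask (mask : String) (out : List String) : Prop := out = parse_mask_alt mask
instance (mask : String) (out : List String) : Decidable (Spec_parse_mask mask out) := by unfold Spec_parse_mask; infer_instance

-- ===== CLAIM (what is proved, stated in full; the proofs are below) =====
def Claim_equal_parse_mask : Prop := ∀ (mask : String), Dom_parse_mask mask → Spec_parse_mask mask (parse_mask mask)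

-- ===== LEMMAS AND PROOFS =====

-- character-tuple form of the Cartesian product, used to relate A's fold to B's recursion
def pmProdT (cs : List (List Char)) : List (List Char) :=
  match cs with
  | [] => [[]]
  | cset :: rest => cset.flatMap (fun c => (pmProdT rest).map (fun t => c :: t))

theorem pmFold_eq_prodT (L : List (List Char)) (acc : List (List Char)) :
    L.foldl (fun acc cset => acc.flatMap (fun t => cset.map (fun c => t ++ [c]))) acc
      = acc.flatMap (fun t => (pmProdT L).map (fun u => t ++ u)) := by
  induction L generalizing acc with
  | nil => simp [pmProdT]
  | cons cset rest ih =>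
    simp only [List.foldl_cons, ih, pmProdT]
    simp [List.flatMap_assoc, List.map_flatMap, List.flatMap_map, List.map_map,
      Function.comp_def, List.append_assoc]

-- mixed-radix decode in recursive (most-significant-first) form
def pmD (cs : List (List Char)) (k : Nat) : List Char :=
  match cs with
  | [] => []
  | c :: rest => c.getD ((k / pmTotal rest) % c.length) ' ' :: pmD rest (k % pmTotal rest)

theorem pmTotal_aux (L : List (List Char)) (a : Nat) :
    L.foldl (fun a c => a * c.length) a = a * pmTotal L := by
  induction L generalizing a with
  | nil => rw [pmTotal]; simp
  | cons c L ih =>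
    rw [List.foldl_cons, ih]
    conv_rhs => rw [pmTotal, List.foldl_cons, ih]
    ring

theorem pmTotal_cons (c : List Char) (L : List (List Char)) :
    pmTotal (c :: L) = c.length * pmTotal L := by
  conv_lhs => rw [pmTotal, List.foldl_cons, pmTotal_aux]
  ring

theorem pmD_mod (L : List (List Char)) (k : Nat) :
    pmD L (k % pmTotal L) = pmD L k := by
  cases L with
  | nil => simp [pmD]
  | cons c L =>
    simp only [pmD, pmTotal_cons]
    congr 1
    · rw [Nat.mul_comm, Nat.mod_mul_right_div_self, Nat.mod_mod_of_dvd _ dvd_rfl]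
    · rw [Nat.mod_mod_of_dvd _ ⟨c.length, by ring⟩]

theorem pmDecode_foldRev (L : List (List Char)) (k : Nat) (w : List Char) :
    L.reverse.foldl
      (fun (p : Nat × List Char) c => (p.1 / c.length, p.2 ++ [c.getD (p.1 % c.length) ' ']))
      (k, w)
    = (k / pmTotal L, w ++ (pmD L k).reverse) := by
  induction L generalizing k w with
  | nil => simp [pmTotal, pmD]
  | cons c L ih =>
    simp only [List.reverse_cons, List.foldl_append, ih, List.foldl_cons, List.foldl_nil]
    refine Prod.ext ?_ ?_
    · simp [pmTotal_cons, Nat.div_div_eq_div_mul, Nat.mul_comm]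
    · simp only [pmD, List.reverse_cons, pmD_mod]
      simp [List.append_assoc]

theorem pmDecode_eq (L : List (List Char)) (k : Nat) : pmDecode L k = pmD L k := by
  unfold pmDecode
  rw [pmDecode_foldRev]
  simp

theorem pmRange_mul (a b : Nat) :
    List.range (a * b) = (List.range a).flatMap (fun i => (List.range b).map (fun j => i * b + j)) := by
  induction a with
  | zero => simp
  | succ a ih =>
    rw [Nat.succ_mul, List.range_add, ih, List.range_succ, List.flatMap_append]
    simp [Nat.mul_comm]

theorem pmFlatMap_index (c : List Char) (F : Char → List (List Char)) :
    c.flatMap F = (List.range c.length).flatMap (fun i => F (c.getD i ' ')) := by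
  induction c with
  | nil => simp
  | cons a c ih =>
    rw [List.flatMap_cons, ih, List.length_cons, List.range_succ_eq_map, List.flatMap_cons]
    simp [List.flatMap_map]

theorem pmProdT_eq_range_decode (L : List (List Char)) :
    pmProdT L = (List.range (pmTotal L)).map (pmD L) := by
  induction L with
  | nil => simp [pmProdT, pmTotal, pmD, List.range_succ]
  | cons c L ih =>
    rw [pmProdT, ih, pmTotal_cons, pmRange_mul, pmFlatMap_index c, List.map_flatMap]
    refine List.flatMap_congr ?_
    intro i hi
    rw [List.map_map, List.map_map]
    refine List.map_congr_left ?_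
    intro j hj
    have hib : i < c.length := List.mem_range.mp hi
    have hjb : j < pmTotal L := List.mem_range.mp hj
    have hb : 0 < pmTotal L := by omega
    simp only [Function.comp_apply, pmD]
    rw [Nat.mul_comm i (pmTotal L), Nat.mul_add_mod, Nat.mod_eq_of_lt hjb]
    congr 1
    rw [Nat.mul_add_div hb, Nat.div_eq_of_lt hjb, Nat.add_zero, Nat.mod_eq_of_lt hib]

theorem pmTake2_cons (cs : List Char) (i : Nat) (h : i < cs.length) (a b : Char)
    (h2 : (cs.drop i).take 2 = [a, b]) : cs.drop i = a :: b :: cs.drop (i + 2) := by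
  rcases e : cs.drop i with _ | ⟨x, t⟩
  · have := List.length_drop (l := cs) (i := i); rw [e] at this; simp at this; omega
  · rcases t with _ | ⟨y, u⟩
    · rw [e] at h2; simp at h2
    · rw [e] at h2
      simp only [List.take_succ_cons, List.take_zero, List.cons.injEq, and_true] at h2
      have hu : cs.drop (i + 2) = u := by
        have : cs.drop (i + 2) = (cs.drop i).drop 2 := by rw [List.drop_drop]
        rw [e] at this; simpa using this
      rw [hu, h2.1, h2.2]

theorem pmLoop_eq_charsets (cs : List Char) (i : Nat) :
    pmLoop cs i = pmCharsets (cs.drop i) := by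
  induction i using pmLoop.induct (cs := cs) with
  | case1 i h two h1 ih =>
    have htwo : two = (cs.drop i).take 2 := rfl
    rw [htwo] at h1
    rw [pmLoop]
    rw [pmTake2_cons cs i h '?' 'l' h1, pmCharsets]
    simp [h, ih]
  | case2 i h two h1 h2 ih =>
    have htwo : two = (cs.drop i).take 2 := rfl
    rw [htwo] at h1 h2
    rw [pmLoop]
    rw [pmTake2_cons cs i h '?' 'u' h2, pmCharsets]
    simp [h, ih]
  | case3 i h two h1 h2 h3 ih =>
    have htwo : two = (cs.drop i).take 2 := rfl
    rw [htwo] at h1 h2 h3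
    rw [pmLoop]
    rw [pmTake2_cons cs i h '?' 'd' h3, pmCharsets]
    simp [h, ih]
  | case4 i h two h1 h2 h3 h4 ih =>
    have htwo : two = (cs.drop i).take 2 := rfl
    rw [htwo] at h1 h2 h3 h4
    rw [pmLoop]
    rw [pmTake2_cons cs i h '?' 's' h4, pmCharsets]
    simp [h, ih]
  | case5 i h two h1 h2 h3 h4 ih =>
    have htwo : two = (cs.drop i).take 2 := rfl
    rw [htwo] at h1 h2 h3 h4
    rw [pmLoop]
    have e : cs.drop i = cs[i] :: cs.drop (i + 1) := List.drop_eq_getElem_cons h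
    rw [e, pmCharsets]
    have etwo : (cs[i] :: cs.drop (i + 1)).take 2 = (cs.drop i).take 2 := by rw [e]
    rw [etwo]
    rw [if_pos h]
    rw [if_neg h1, if_neg h2, if_neg h3, if_neg h4, ih, e]
    rw [etwo, if_neg h1, if_neg h2, if_neg h3, if_neg h4]
    have ht : List.take 1 (List.drop i cs) = [cs[i]] := by rw [e]; rfl
    simp [ht]
  | case6 i h =>
    rw [pmLoop]
    rw [List.drop_of_length_le (by omega), pmCharsets]
    simp [h]

-- ===== VERDICT (by name: the statement is the Claim_ definition above) =====
theorem parse_mask_spec : Claim_equal_parse_mask := by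
  intro mask _
  unfold Spec_parse_mask parse_mask parse_mask_alt
  rw [pmLoop_eq_charsets, List.drop_zero, pmFold_eq_prodT]
  simp [pmProdT_eq_range_decode, pmDecode_eq]
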